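-- pv_equiv track=rewrite | github.com/sl01220/2048-Python | 0/python projects/f149 test.py | detect_bombs
-- ===== SOURCE A (Python) =====
-- def is_valid_position(r, c, R, C):
--     return 0 <= r < R and 0 <= c < C
--
-- def detect_bombs(grid, R, C):
--     # Directions for the 8 surrounding cells
--     directions = [(-1, -1), (-1, 0), (-1, 1),
--                   (0, -1),        (0, 1),
--                   (1, -1), (1, 0), (1, 1)]
--
--     detected_bombs = 0
--     undetected_bombs = 0
--     bomb_positions = set()
--     malfunctioning_detectors = set()
--
--     # Identify bomb positions
--     for r in range(R):
--         for c in range(C):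
--             if grid[r][c] == 1:
--                 bomb_positions.add((r, c))
--
--     # Identify malfunctioning detectors
--     for r in range(R):
--         for c in range(C):
--             if grid[r][c] == 5:
--                 for dr, dc in directions:
--                     nr, nc = r + dr, c + dc
--                     if is_valid_position(nr, nc, R, C) and grid[nr][nc] == 5:
--                         malfunctioning_detectors.add((r, c))
--                         malfunctioning_detectors.add((nr, nc))
--
--     # Detect bombs with functioning detectors
--     for r in range(R):
--         for c in range(C):
--             if grid[r][c] == 5 and (r, c) not in malfunctioning_detectors:
--                 for dr, dc in directions:
--                     nr, nc = r + dr, c + dc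
--                     if is_valid_position(nr, nc, R, C) and grid[nr][nc] == 1:
--                         if (nr, nc) in bomb_positions:
--                             detected_bombs += 1
--                             bomb_positions.remove((nr, nc))
--
--     undetected_bombs = len(bomb_positions)
--
--     return detected_bombs, undetected_bombs
-- ===== SOURCE B (Python) =====
-- def detect_bombs(grid, R, C):
--     # Bomb-centric pass: no sets at all; a bomb counts as detected iff some
--     # neighbor is a functioning detector (a 5 with no adjacent 5).
--     directions = [(-1, -1), (-1, 0), (-1, 1),
--                   (0, -1),        (0, 1),
--                   (1, -1), (1, 0), (1, 1)]
--
--     def functioning(r, c):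
--         return grid[r][c] == 5 and all(
--             not (0 <= r + dr < R and 0 <= c + dc < C and grid[r + dr][c + dc] == 5)
--             for dr, dc in directions)
--
--     detected_bombs = 0
--     undetected_bombs = 0
--     for r in range(R):
--         for c in range(C):
--             if grid[r][c] == 1:
--                 if any(0 <= r + dr < R and 0 <= c + dc < C and functioning(r + dr, c + dc)
--                        for dr, dc in directions):
--                     detected_bombs += 1
--                 else:
--                     undetected_bombs += 1
--     return detected_bombs, undetected_bombs
-- ===== Notes on version B (the rewrite author's own statement) =====
-- stated objective: simpler
-- what changed: B replaces A's three passes with mutable bomb and malfunctioning-detector sets (and remove-on-detection bookkeeping) by a single bomb-centric scan that classifies each bomb directly: detected iff some neighbor is a functioning detector (a 5 with no adjacent 5), using no sets at all.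
import Mathlib
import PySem

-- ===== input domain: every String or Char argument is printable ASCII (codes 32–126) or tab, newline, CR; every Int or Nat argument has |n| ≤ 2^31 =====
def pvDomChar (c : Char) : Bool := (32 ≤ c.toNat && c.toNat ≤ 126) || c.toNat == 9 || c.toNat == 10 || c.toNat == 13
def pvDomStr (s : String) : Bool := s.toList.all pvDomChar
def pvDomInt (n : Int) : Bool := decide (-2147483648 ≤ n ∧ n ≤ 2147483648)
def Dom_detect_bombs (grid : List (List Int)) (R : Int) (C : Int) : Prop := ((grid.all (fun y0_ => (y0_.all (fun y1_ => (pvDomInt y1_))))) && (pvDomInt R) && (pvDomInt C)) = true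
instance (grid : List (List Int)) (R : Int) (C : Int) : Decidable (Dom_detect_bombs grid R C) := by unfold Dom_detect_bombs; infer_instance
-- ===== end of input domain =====

-- B replaces A's three passes with mutable bomb/malfunction sets by one bomb-centric scan
-- classifying each bomb directly (objective: simpler; same asymptotic cost).

-- ===== PORT A =====
def pvDirections : List (Int × Int) :=
  [(-1, -1), (-1, 0), (-1, 1), (0, -1), (0, 1), (1, -1), (1, 0), (1, 1)]

-- grid[r][c]; total form of indexing, exact under Pre_ (all accesses are in range there)
def pvCell (grid : List (List Int)) (r c : Int) : Int :=
  PySem.List.pyGetD (PySem.List.pyGetD grid r []) c 0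

def is_valid_position (r c R C : Int) : Bool :=
  decide (0 ≤ r ∧ r < R) && decide (0 ≤ c ∧ c < C)

def pvBombCellStep (grid : List (List Int)) (r : Int)
    (bp : PySem.Set (Int × Int)) (c : Int) : PySem.Set (Int × Int) :=
  if pvCell grid r c == 1 then PySem.Set.add bp (r, c) else bp

def pvMalfDirStep (grid : List (List Int)) (R C r c : Int)
    (md : PySem.Set (Int × Int)) (dd : Int × Int) : PySem.Set (Int × Int) :=
  let nr := r + dd.1
  let nc := c + dd.2
  if is_valid_position nr nc R C && (pvCell grid nr nc == 5) then
    PySem.Set.add (PySem.Set.add md (r, c)) (nr, nc)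
  else md

def pvMalfCellStep (grid : List (List Int)) (R C r : Int)
    (md : PySem.Set (Int × Int)) (c : Int) : PySem.Set (Int × Int) :=
  if pvCell grid r c == 5 then pvDirections.foldl (pvMalfDirStep grid R C r c) md else md

def pvDetDirStep (grid : List (List Int)) (R C r c : Int)
    (st : Int × PySem.Set (Int × Int)) (dd : Int × Int) : Int × PySem.Set (Int × Int) :=
  let nr := r + dd.1
  let nc := c + dd.2
  if is_valid_position nr nc R C && (pvCell grid nr nc == 1) then
    if PySem.Set.contains st.2 (nr, nc) then
      (st.1 + 1, PySem.Set.discard st.2 (nr, nc))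
    else st
  else st

def pvDetCellStep (grid : List (List Int)) (R C : Int) (malf : PySem.Set (Int × Int)) (r : Int)
    (st : Int × PySem.Set (Int × Int)) (c : Int) : Int × PySem.Set (Int × Int) :=
  if (pvCell grid r c == 5) && !(PySem.Set.contains malf (r, c)) then
    pvDirections.foldl (pvDetDirStep grid R C r c) st
  else st

def detect_bombs (grid : List (List Int)) (R : Int) (C : Int) : Int × Int :=
  let bomb_positions : PySem.Set (Int × Int) :=
    (PySem.List.pyRange 0 R).foldl
      (fun bp r => (PySem.List.pyRange 0 C).foldl (fun bp c => pvBombCellStep grid r bp c) bp) PySem.Set.empty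
  let malfunctioning_detectors : PySem.Set (Int × Int) :=
    (PySem.List.pyRange 0 R).foldl
      (fun md r => (PySem.List.pyRange 0 C).foldl (fun md c => pvMalfCellStep grid R C r md c) md) PySem.Set.empty
  let st :=
    (PySem.List.pyRange 0 R).foldl
      (fun st r => (PySem.List.pyRange 0 C).foldl
        (fun st c => pvDetCellStep grid R C malfunctioning_detectors r st c) st) ((0 : Int), bomb_positions)
  (st.1, PySem.Set.len st.2)

-- ===== PORT B =====
def pvInb (R C r c : Int) : Bool :=
  decide (0 ≤ r ∧ r < R) && decide (0 ≤ c ∧ c < C)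

def pvFunctioning (grid : List (List Int)) (R C r c : Int) : Bool :=
  (pvCell grid r c == 5) &&
  pvDirections.all (fun dd =>
    !(pvInb R C (r + dd.1) (c + dd.2) && (pvCell grid (r + dd.1) (c + dd.2) == 5)))

def pvCountCellStep (grid : List (List Int)) (R C r : Int)
    (st : Int × Int) (c : Int) : Int × Int :=
  if pvCell grid r c == 1 then
    if pvDirections.any (fun dd =>
        pvInb R C (r + dd.1) (c + dd.2) && pvFunctioning grid R C (r + dd.1) (c + dd.2)) then
      (st.1 + 1, st.2)
    else (st.1, st.2 + 1)
  else st

def detect_bombs_alt (grid : List (List Int)) (R : Int) (C : Int) : Int × Int :=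
  (PySem.List.pyRange 0 R).foldl
    (fun st r => (PySem.List.pyRange 0 C).foldl (fun st c => pvCountCellStep grid R C r st c) st) ((0 : Int), (0 : Int))

-- ===== PRECONDITION & SPEC =====
-- Pre_ excludes exactly the inputs where Python A raises IndexError: when R > 0 and C > 0
-- (otherwise nothing is ever indexed), a grid with fewer than R rows, or a row among the
-- first R with fewer than C entries.
def Pre_detect_bombs (grid : List (List Int)) (R : Int) (C : Int) : Prop :=
  0 < R → 0 < C → (R ≤ (grid.length : Int) ∧ ∀ row ∈ grid.take R.toNat, C ≤ (row.length : Int))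
instance (grid : List (List Int)) (R : Int) (C : Int) : Decidable (Pre_detect_bombs grid R C) := by
  unfold Pre_detect_bombs; infer_instance

def pvWitness_detect_bombs : List (List Int) × Int × Int := ([[1, 0], [5, 0]], 2, 2)

def Spec_detect_bombs (grid : List (List Int)) (R : Int) (C : Int) (out : Int × Int) : Prop := out = detect_bombs_alt grid R C
instance (grid : List (List Int)) (R : Int) (C : Int) (out : Int × Int) : Decidable (Spec_detect_bombs grid R C out) := by unfold Spec_detect_bombs; infer_instance

-- ===== CLAIM (what is proved, stated in full; the proofs are below) =====
def Claim_equal_detect_bombs : Prop := ∀ (grid : List (List Int)) (R : Int) (C : Int), Dom_detect_bombs grid R C → Pre_detect_bombs grid R C → Spec_detect_bombs grid R C (detect_bombs grid R C)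

-- ===== LEMMAS AND PROOFS =====

-- the list of grid positions scanned by the nested `for r in range(R): for c in range(C)` loops
def pvCells (R C : Int) : List (Int × Int) :=
  (PySem.List.pyRange 0 R) ×ˢ (PySem.List.pyRange 0 C)

lemma mem_pvCells {R C : Int} {p : Int × Int} :
    p ∈ pvCells R C ↔ (0 ≤ p.1 ∧ p.1 < R) ∧ (0 ≤ p.2 ∧ p.2 < C) := by
  obtain ⟨r, c⟩ := p
  simp [pvCells, PySem.List.mem_pyRange_one]

lemma nodup_pvCells (R C : Int) : (pvCells R C).Nodup :=
  List.Nodup.product (PySem.List.nodup_pyRange_one _ _) (PySem.List.nodup_pyRange_one _ _)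

-- collapsing the two nested range loops into one fold over the cell list
lemma foldl_nested {σ : Type} (R C : Int) (f : σ → Int → Int → σ) (s0 : σ) :
    (PySem.List.pyRange 0 R).foldl
      (fun s r => (PySem.List.pyRange 0 C).foldl (fun s c => f s r c) s) s0
      = (pvCells R C).foldl (fun s p => f s p.1 p.2) s0 := by
  rw [show pvCells R C
        = (PySem.List.pyRange 0 R).flatMap
            (fun r => (PySem.List.pyRange 0 C).map (fun c => (r, c))) from rfl,
      List.foldl_flatMap]
  simp [List.foldl_map]

-- Bool views of the two programs' tests
def pvBombB (grid : List (List Int)) (p : Int × Int) : Bool := pvCell grid p.1 p.2 == 1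

def pvB0 (grid : List (List Int)) (R C : Int) : List (Int × Int) :=
  (pvCells R C).filter (pvBombB grid)

def pvMalf (grid : List (List Int)) (R C : Int) : PySem.Set (Int × Int) :=
  (pvCells R C).foldl (fun md q => pvMalfCellStep grid R C q.1 md q.2) PySem.Set.empty

def pvDetOK (grid : List (List Int)) (R C : Int) (q : Int × Int) : Bool :=
  (pvCell grid q.1 q.2 == 5) && !(PySem.Set.contains (pvMalf grid R C) q)

def pvAct (grid : List (List Int)) (R C r c : Int) (dd : Int × Int) : Bool :=
  is_valid_position (r + dd.1) (c + dd.2) R C && (pvCell grid (r + dd.1) (c + dd.2) == 1)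

def pvTrig (grid : List (List Int)) (R C : Int) (q b : Int × Int) : Bool :=
  pvDirections.any (fun dd => pvAct grid R C q.1 q.2 dd && (b == (q.1 + dd.1, q.2 + dd.2)))

def pvHitA (grid : List (List Int)) (R C : Int) (b : Int × Int) : Bool :=
  (pvCells R C).any (fun q => pvDetOK grid R C q && pvTrig grid R C q b)

def pvHit (grid : List (List Int)) (R C : Int) (p : Int × Int) : Bool :=
  pvDirections.any (fun dd =>
    pvInb R C (p.1 + dd.1) (p.2 + dd.2) && pvFunctioning grid R C (p.1 + dd.1) (p.2 + dd.2))

lemma pvDirections_neg_mem : ∀ dd ∈ pvDirections, ((-dd.1, -dd.2) : Int × Int) ∈ pvDirections := by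
  decide

-- ---- loop 1: the bomb set is the filtered cell list ----
lemma foldl_bombCell (grid : List (List Int)) :
    ∀ (l : List (Int × Int)) (s : PySem.Set (Int × Int)), l.Nodup → (∀ x ∈ l, x ∉ s) →
      l.foldl (fun bp p => pvBombCellStep grid p.1 bp p.2) s = s ++ l.filter (pvBombB grid) := by
  intro l
  induction l with
  | nil => intro s _ _; simp
  | cons p l ih =>
    intro s hnd hdisj
    have hpns : p ∉ s := hdisj p (by simp)
    have hnd' := (List.nodup_cons.mp hnd)
    rw [List.foldl_cons]
    by_cases h : (pvCell grid p.1 p.2 == 1) = true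
    · have h1 : pvBombCellStep grid p.1 s p.2 = s ++ [p] := by
        simp only [pvBombCellStep, if_pos h, PySem.Set.add_of_not_mem hpns]
      rw [h1, ih (s ++ [p]) hnd'.2 ?_]
      · simp [pvBombB, h]
      · intro x hx
        simp only [List.mem_append, List.mem_singleton]
        rintro (hxs | rfl)
        · exact hdisj x (by simp [hx]) hxs
        · exact hnd'.1 hx
    · have h1 : pvBombCellStep grid p.1 s p.2 = s := by
        simp only [pvBombCellStep, if_neg h]
      rw [h1, ih s hnd'.2 (fun x hx => hdisj x (by simp [hx]))]
      simp [pvBombB, h]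

-- ---- loop 2: membership in the malfunctioning-detector set ----
lemma mem_malfDirFold (grid : List (List Int)) (R C r c : Int) :
    ∀ (ds : List (Int × Int)) (m : PySem.Set (Int × Int)) (p : Int × Int),
      (p ∈ ds.foldl (pvMalfDirStep grid R C r c) m ↔
        p ∈ m ∨ ∃ dd ∈ ds,
          (is_valid_position (r + dd.1) (c + dd.2) R C
            && (pvCell grid (r + dd.1) (c + dd.2) == 5)) = true ∧
          (p = (r, c) ∨ p = (r + dd.1, c + dd.2))) := by
  intro ds
  induction ds with
  | nil => intro m p; simp
  | cons dd ds ih =>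
    intro m p
    rw [List.foldl_cons]
    by_cases h : (is_valid_position (r + dd.1) (c + dd.2) R C
        && (pvCell grid (r + dd.1) (c + dd.2) == 5)) = true
    · have h1 : pvMalfDirStep grid R C r c m dd
          = PySem.Set.add (PySem.Set.add m (r, c)) (r + dd.1, c + dd.2) := by
        simp only [pvMalfDirStep, if_pos h]
      rw [h1, ih]
      simp only [PySem.Set.mem_add, List.mem_cons]
      constructor
      · rintro ((( hm | rfl) | rfl) | ⟨dd', hdd', hcond, hp⟩)
        · exact Or.inl hm
        · exact Or.inr ⟨dd, Or.inl rfl, h, Or.inl rfl⟩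
        · exact Or.inr ⟨dd, Or.inl rfl, h, Or.inr rfl⟩
        · exact Or.inr ⟨dd', Or.inr hdd', hcond, hp⟩
      · rintro (hm | ⟨dd', (rfl | hdd'), hcond, hp⟩)
        · exact Or.inl (Or.inl (Or.inl hm))
        · rcases hp with rfl | rfl
          · exact Or.inl (Or.inl (Or.inr rfl))
          · exact Or.inl (Or.inr rfl)
        · exact Or.inr ⟨dd', hdd', hcond, hp⟩
    · have h1 : pvMalfDirStep grid R C r c m dd = m := by
        simp only [pvMalfDirStep, if_neg h]
      rw [h1, ih]
      constructor
      · rintro (hm | ⟨dd', hdd', hcond, hp⟩)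
        · exact Or.inl hm
        · exact Or.inr ⟨dd', List.mem_cons_of_mem _ hdd', hcond, hp⟩
      · rintro (hm | ⟨dd', hdd', hcond, hp⟩)
        · exact Or.inl hm
        · rcases List.mem_cons.mp hdd' with rfl | hdd''
          · exact absurd hcond h
          · exact Or.inr ⟨dd', hdd'', hcond, hp⟩

lemma mem_malfFold (grid : List (List Int)) (R C : Int) :
    ∀ (l : List (Int × Int)) (m : PySem.Set (Int × Int)) (p : Int × Int),
      (p ∈ l.foldl (fun md q => pvMalfCellStep grid R C q.1 md q.2) m ↔
        p ∈ m ∨ ∃ q ∈ l, (pvCell grid q.1 q.2 == 5) = true ∧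
          ∃ dd ∈ pvDirections,
            (is_valid_position (q.1 + dd.1) (q.2 + dd.2) R C
              && (pvCell grid (q.1 + dd.1) (q.2 + dd.2) == 5)) = true ∧
            (p = q ∨ p = (q.1 + dd.1, q.2 + dd.2))) := by
  intro l
  induction l with
  | nil => intro m p; simp
  | cons q l ih =>
    intro m p
    rw [List.foldl_cons]
    by_cases h : (pvCell grid q.1 q.2 == 5) = true
    · have h1 : pvMalfCellStep grid R C q.1 m q.2
          = pvDirections.foldl (pvMalfDirStep grid R C q.1 q.2) m := by
        simp only [pvMalfCellStep, if_pos h]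
      rw [h1, ih]
      rw [mem_malfDirFold]
      constructor
      · rintro ((hm | ⟨dd, hdd, hcond, hp⟩) | ⟨q', hq', hq5, rest⟩)
        · exact Or.inl hm
        · exact Or.inr ⟨q, List.mem_cons_self .., h, dd, hdd, hcond, by simpa using hp⟩
        · exact Or.inr ⟨q', List.mem_cons_of_mem _ hq', hq5, rest⟩
      · rintro (hm | ⟨q', hq', hq5, dd, hdd, hcond, hp⟩)
        · exact Or.inl (Or.inl hm)
        · rcases List.mem_cons.mp hq' with rfl | hq''
          · exact Or.inl (Or.inr ⟨dd, hdd, hcond, by simpa using hp⟩)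
          · exact Or.inr ⟨q', hq'', hq5, dd, hdd, hcond, hp⟩
    · have h1 : pvMalfCellStep grid R C q.1 m q.2 = m := by
        simp only [pvMalfCellStep, if_neg h]
      rw [h1, ih]
      constructor
      · rintro (hm | ⟨q', hq', hq5, rest⟩)
        · exact Or.inl hm
        · exact Or.inr ⟨q', List.mem_cons_of_mem _ hq', hq5, rest⟩
      · rintro (hm | ⟨q', hq', hq5, rest⟩)
        · exact Or.inl hm
        · rcases List.mem_cons.mp hq' with rfl | hq''
          · exact absurd hq5 h
          · exact Or.inr ⟨q', hq'', hq5, rest⟩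

lemma mem_pvMalf_iff (grid : List (List Int)) (R C : Int) (p : Int × Int) :
    p ∈ pvMalf grid R C ↔
      ((0 ≤ p.1 ∧ p.1 < R) ∧ (0 ≤ p.2 ∧ p.2 < C)) ∧ pvCell grid p.1 p.2 = 5 ∧
        ∃ dd ∈ pvDirections,
          is_valid_position (p.1 + dd.1) (p.2 + dd.2) R C = true ∧
          pvCell grid (p.1 + dd.1) (p.2 + dd.2) = 5 := by
  rw [pvMalf, mem_malfFold]
  constructor
  · rintro (hm | ⟨q, hq, hq5, dd, hdd, hcond, hp⟩)
    · simp [PySem.Set.empty] at hm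
    · have hqv := mem_pvCells.mp hq
      rw [Bool.and_eq_true] at hcond
      have hval : (0 ≤ q.1 + dd.1 ∧ q.1 + dd.1 < R) ∧ (0 ≤ q.2 + dd.2 ∧ q.2 + dd.2 < C) := by
        have := hcond.1
        simp [is_valid_position] at this
        tauto
      have hc5 : pvCell grid (q.1 + dd.1) (q.2 + dd.2) = 5 := by
        simpa using hcond.2
      rcases hp with rfl | rfl
      · refine ⟨hqv, by simpa using hq5, dd, hdd, hcond.1, hc5⟩
      · refine ⟨by simpa using hval, by simpa using hc5, (-dd.1, -dd.2),
          pvDirections_neg_mem dd hdd, ?_, ?_⟩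
        · simp only [is_valid_position]
          have : q.1 + dd.1 + -dd.1 = q.1 ∧ q.2 + dd.2 + -dd.2 = q.2 := by constructor <;> ring
          rw [this.1, this.2]
          simp [hqv.1, hqv.2]
        · have : q.1 + dd.1 + -dd.1 = q.1 ∧ q.2 + dd.2 + -dd.2 = q.2 := by constructor <;> ring
          rw [this.1, this.2]
          simpa using hq5
  · rintro ⟨hv, h5, dd, hdd, hval, hc5⟩
    refine Or.inr ⟨p, mem_pvCells.mpr hv, by simpa using h5, dd, hdd, ?_, Or.inl (by simp)⟩
    simp [hval, hc5]

lemma detOK_eq_functioning (grid : List (List Int)) (R C : Int) (q : Int × Int)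
    (hq : q ∈ pvCells R C) :
    pvDetOK grid R C q = pvFunctioning grid R C q.1 q.2 := by
  have hqv := mem_pvCells.mp hq
  by_cases h5 : (pvCell grid q.1 q.2 == 5) = true
  · rw [Bool.eq_iff_iff]
    simp only [pvDetOK, pvFunctioning, h5, Bool.true_and, Bool.not_eq_true',
      List.all_eq_true]
    rw [← Bool.not_eq_true, PySem.Set.contains_iff, mem_pvMalf_iff]
    constructor
    · intro hnm dd hdd
      by_contra hcon
      rw [Bool.not_eq_false, Bool.and_eq_true] at hcon
      apply hnm
      refine ⟨hqv, by simpa using h5, dd, hdd, hcon.1, by simpa using hcon.2⟩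
    · intro hall hmem
      obtain ⟨-, -, dd, hdd, hval, hc5⟩ := hmem
      have h := hall dd hdd
      rw [Bool.and_eq_false_iff] at h
      rcases h with h | h
      · exact absurd hval (by simpa using h)
      · simp [hc5] at h
  · simp only [pvDetOK, pvFunctioning]
    rw [Bool.not_eq_true] at h5
    rw [h5]
    simp


-- ---- loop 3: characterisation of the detection fold ----
lemma detDirFold (grid : List (List Int)) (R C r c : Int) :
    ∀ (ds : List (Int × Int)) (st : Int × PySem.Set (Int × Int)), st.2.Nodup →
      (ds.foldl (pvDetDirStep grid R C r c) st).2
        = st.2.filter (fun b => !(ds.any (fun dd => pvAct grid R C r c dd && (b == (r + dd.1, c + dd.2)))))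
      ∧ (ds.foldl (pvDetDirStep grid R C r c) st).1
          + (((ds.foldl (pvDetDirStep grid R C r c) st).2.length : Int))
        = st.1 + (st.2.length : Int) := by
  intro ds
  induction ds with
  | nil => intro st _; simp
  | cons dd ds ih =>
    intro st hnd
    rw [List.foldl_cons]
    by_cases hact : pvAct grid R C r c dd = true
    · by_cases hmem : ((r + dd.1, c + dd.2) : Int × Int) ∈ st.2
      · have hcont : PySem.Set.contains st.2 (r + dd.1, c + dd.2) = true :=
          (PySem.Set.contains_iff _ _).mpr hmem
        have hstep : pvDetDirStep grid R C r c st dd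
            = (st.1 + 1, PySem.Set.discard st.2 (r + dd.1, c + dd.2)) := by
          have hact' := hact
          simp only [pvAct] at hact'
          simp only [pvDetDirStep, if_pos hact', if_pos hcont]
        rw [hstep]
        have hnd' : (PySem.Set.discard st.2 (r + dd.1, c + dd.2)).Nodup :=
          PySem.Set.nodup_discard _ _ hnd
        obtain ⟨h2, h1⟩ := ih (st.1 + 1, PySem.Set.discard st.2 (r + dd.1, c + dd.2)) hnd'
        have hdisc : PySem.Set.discard st.2 (r + dd.1, c + dd.2)
            = st.2.filter (fun y => !(y == (r + dd.1, c + dd.2))) := rfl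
        constructor
        · rw [h2, hdisc, List.filter_filter]
          apply List.filter_congr
          intro b _
          simp [hact, Bool.not_or, Bool.and_comm]
        · rw [h1]
          have hlen : (PySem.Set.discard st.2 (r + dd.1, c + dd.2)).length
              = st.2.length - 1 := by
            have he : PySem.Set.discard st.2 (r + dd.1, c + dd.2)
                = st.2.erase (r + dd.1, c + dd.2) := by
              rw [List.Nodup.erase_eq_filter hnd, hdisc]
              apply List.filter_congr
              intro b _
              simp [bne]
            rw [he, List.length_erase_of_mem hmem]
          have hpos : 1 ≤ st.2.length := List.length_pos_of_mem hmem
          rw [hlen]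
          push_cast [Nat.cast_sub hpos]
          ring
      · have hcont : PySem.Set.contains st.2 (r + dd.1, c + dd.2) = false := by
          rw [← Bool.not_eq_true, PySem.Set.contains_iff]
          exact hmem
        have hstep : pvDetDirStep grid R C r c st dd = st := by
          have hact' := hact
          simp only [pvAct] at hact'
          simp only [pvDetDirStep, if_pos hact', hcont]
          simp
        rw [hstep]
        obtain ⟨h2, h1⟩ := ih st hnd
        refine ⟨?_, h1⟩
        rw [h2]
        apply List.filter_congr
        intro b hb
        have hbne : (b == ((r + dd.1, c + dd.2) : Int × Int)) = false := by
          rw [beq_eq_false_iff_ne]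
          rintro rfl
          exact hmem hb
        simp [hbne]
    · have hactf : pvAct grid R C r c dd = false := by simpa using hact
      have hstep : pvDetDirStep grid R C r c st dd = st := by
        simp only [pvAct] at hactf
        simp [pvDetDirStep, hactf]
      rw [hstep]
      obtain ⟨h2, h1⟩ := ih st hnd
      refine ⟨?_, h1⟩
      rw [h2]
      apply List.filter_congr
      intro b _
      simp [hact]


lemma detCellFold (grid : List (List Int)) (R C : Int) :
    ∀ (l : List (Int × Int)) (st : Int × PySem.Set (Int × Int)), st.2.Nodup →
      (l.foldl (fun st q => pvDetCellStep grid R C (pvMalf grid R C) q.1 st q.2) st).2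
        = st.2.filter (fun b => !(l.any (fun q => pvDetOK grid R C q && pvTrig grid R C q b)))
      ∧ (l.foldl (fun st q => pvDetCellStep grid R C (pvMalf grid R C) q.1 st q.2) st).1
          + (((l.foldl (fun st q => pvDetCellStep grid R C (pvMalf grid R C) q.1 st q.2) st).2.length : Int))
        = st.1 + (st.2.length : Int) := by
  intro l
  induction l with
  | nil => intro st _; simp
  | cons q l ih =>
    intro st hnd
    rw [List.foldl_cons]
    by_cases hok : pvDetOK grid R C q = true
    · have hstep : pvDetCellStep grid R C (pvMalf grid R C) q.1 st q.2
          = pvDirections.foldl (pvDetDirStep grid R C q.1 q.2) st := by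
        simp only [pvDetCellStep]
        rw [if_pos (show (pvCell grid q.1 q.2 == 5
          && !(pvMalf grid R C).contains (q.1, q.2)) = true from hok)]
      rw [hstep]
      obtain ⟨hd2, hd1⟩ := detDirFold grid R C q.1 q.2 pvDirections st hnd
      have hnd' : (pvDirections.foldl (pvDetDirStep grid R C q.1 q.2) st).2.Nodup := by
        rw [hd2]; exact hnd.filter _
      obtain ⟨h2, h1⟩ := ih _ hnd'
      constructor
      · rw [h2, hd2, List.filter_filter]
        apply List.filter_congr
        intro b _
        simp [pvTrig, hok, Bool.not_or, Bool.and_comm]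
      · exact h1.trans hd1
    · have hstep : pvDetCellStep grid R C (pvMalf grid R C) q.1 st q.2 = st := by
        simp only [pvDetCellStep]
        rw [if_neg (show ¬ (pvCell grid q.1 q.2 == 5
          && !(pvMalf grid R C).contains (q.1, q.2)) = true from hok)]
      rw [hstep]
      obtain ⟨h2, h1⟩ := ih st hnd
      refine ⟨?_, h1⟩
      rw [h2]
      apply List.filter_congr
      intro b _
      have hokf : pvDetOK grid R C q = false := by simpa using hok
      simp [hokf]


-- ---- the two hit predicates agree on bombs ----
lemma hitA_eq_hit (grid : List (List Int)) (R C : Int) (b : Int × Int)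
    (hb : b ∈ pvCells R C) (hbomb : pvBombB grid b = true) :
    pvHitA grid R C b = pvHit grid R C b := by
  have hbv := mem_pvCells.mp hb
  rw [Bool.eq_iff_iff]
  simp only [pvHitA, pvHit, List.any_eq_true]
  constructor
  · rintro ⟨q, hq, hcond⟩
    rw [Bool.and_eq_true] at hcond
    obtain ⟨hok, htrig⟩ := hcond
    simp only [pvTrig, List.any_eq_true] at htrig
    obtain ⟨dd, hdd, h⟩ := htrig
    rw [Bool.and_eq_true] at h
    obtain ⟨hact, hbeq⟩ := h
    have hbeq' : b = (q.1 + dd.1, q.2 + dd.2) := by simpa using hbeq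
    refine ⟨(-dd.1, -dd.2), pvDirections_neg_mem dd hdd, ?_⟩
    have hb1 : b.1 + -dd.1 = q.1 := by rw [hbeq']; ring
    have hb2 : b.2 + -dd.2 = q.2 := by rw [hbeq']; ring
    rw [Bool.and_eq_true]
    constructor
    · show pvInb R C (b.1 + -dd.1) (b.2 + -dd.2) = true
      rw [hb1, hb2]
      have hqv := mem_pvCells.mp hq
      simp [pvInb, hqv.1.1, hqv.1.2, hqv.2.1, hqv.2.2]
    · show pvFunctioning grid R C (b.1 + -dd.1) (b.2 + -dd.2) = true
      rw [hb1, hb2, ← detOK_eq_functioning grid R C q hq]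
      exact hok
  · rintro ⟨dd, hdd, h⟩
    rw [Bool.and_eq_true] at h
    obtain ⟨hinb, hfun⟩ := h
    have hval : (0 ≤ b.1 + dd.1 ∧ b.1 + dd.1 < R) ∧ (0 ≤ b.2 + dd.2 ∧ b.2 + dd.2 < C) := by
      simp [pvInb] at hinb
      tauto
    have hqmem : ((b.1 + dd.1, b.2 + dd.2) : Int × Int) ∈ pvCells R C :=
      mem_pvCells.mpr (by simpa using hval)
    refine ⟨(b.1 + dd.1, b.2 + dd.2), hqmem, ?_⟩
    rw [Bool.and_eq_true]
    constructor
    · rw [detOK_eq_functioning grid R C _ hqmem]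
      exact hfun
    · simp only [pvTrig, List.any_eq_true]
      refine ⟨(-dd.1, -dd.2), pvDirections_neg_mem dd hdd, ?_⟩
      rw [Bool.and_eq_true]
      have hb1 : b.1 + dd.1 + -dd.1 = b.1 := by ring
      have hb2 : b.2 + dd.2 + -dd.2 = b.2 := by ring
      constructor
      · show (is_valid_position (b.1 + dd.1 + -dd.1) (b.2 + dd.2 + -dd.2) R C
            && (pvCell grid (b.1 + dd.1 + -dd.1) (b.2 + dd.2 + -dd.2) == 1)) = true
        rw [hb1, hb2, Bool.and_eq_true]
        constructor
        · simp [is_valid_position, hbv.1.1, hbv.1.2, hbv.2.1, hbv.2.2]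
        · exact hbomb
      · show (b == ((b.1 + dd.1 + -dd.1, b.2 + dd.2 + -dd.2) : Int × Int)) = true
        rw [hb1, hb2]
        simp


-- ---- values of the two ports ----
lemma detect_bombs_eq (grid : List (List Int)) (R C : Int) :
    detect_bombs grid R C
      = (((pvB0 grid R C).length : Int)
            - (((pvB0 grid R C).filter (fun b => !pvHitA grid R C b)).length : Int),
         (((pvB0 grid R C).filter (fun b => !pvHitA grid R C b)).length : Int)) := by
  have hB : (PySem.List.pyRange 0 R).foldl
      (fun bp r => (PySem.List.pyRange 0 C).foldl (fun bp c => pvBombCellStep grid r bp c) bp)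
      PySem.Set.empty = pvB0 grid R C := by
    have h := foldl_nested R C (fun s r c => pvBombCellStep grid r s c)
      (PySem.Set.empty : PySem.Set (Int × Int))
    refine h.trans ?_
    have h2 := foldl_bombCell grid (pvCells R C) PySem.Set.empty (nodup_pvCells R C)
      (by intro x _ hx; simp [PySem.Set.empty] at hx)
    exact h2.trans (by simp [pvB0, PySem.Set.empty])
  have hM : (PySem.List.pyRange 0 R).foldl
      (fun md r => (PySem.List.pyRange 0 C).foldl (fun md c => pvMalfCellStep grid R C r md c) md)
      PySem.Set.empty = pvMalf grid R C :=
    foldl_nested R C (fun s r c => pvMalfCellStep grid R C r s c) PySem.Set.empty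
  have hndB0 : (pvB0 grid R C).Nodup := (nodup_pvCells R C).filter _
  obtain ⟨h2, h1⟩ := detCellFold grid R C (pvCells R C) (0, pvB0 grid R C) hndB0
  have h3 := foldl_nested R C (fun st r c => pvDetCellStep grid R C (pvMalf grid R C) r st c)
    (((0 : Int), pvB0 grid R C))
  simp only [detect_bombs, hB, hM, h3]
  set F := (pvCells R C).foldl
    (fun st q => pvDetCellStep grid R C (pvMalf grid R C) q.1 st q.2) (0, pvB0 grid R C) with hF
  have hlen : PySem.Set.len F.2 = ((F.2.length : Int)) := rfl
  rw [hlen, h2]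
  have : F.1 = ((pvB0 grid R C).length : Int)
      - (((pvB0 grid R C).filter (fun b => !pvHitA grid R C b)).length : Int) := by
    have := h1
    rw [h2] at this
    simp only [pvHitA] at *
    omega
  rw [this]
  simp only [pvHitA]


lemma countFold (grid : List (List Int)) (R C : Int) :
    ∀ (l : List (Int × Int)) (st : Int × Int),
      l.foldl (fun st q => pvCountCellStep grid R C q.1 st q.2) st
        = (st.1 + ((l.filter (fun q => pvBombB grid q && pvHit grid R C q)).length : Int),
           st.2 + ((l.filter (fun q => pvBombB grid q && !pvHit grid R C q)).length : Int)) := by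
  intro l
  induction l with
  | nil => intro st; simp
  | cons q l ih =>
    intro st
    rw [List.foldl_cons]
    by_cases hbomb : pvBombB grid q = true
    · by_cases hhit : pvHit grid R C q = true
      · have hstep : pvCountCellStep grid R C q.1 st q.2 = (st.1 + 1, st.2) := by
          simp only [pvCountCellStep]
          rw [if_pos (show (pvCell grid q.1 q.2 == 1) = true from hbomb),
            if_pos (show (pvDirections.any fun dd =>
              pvInb R C (q.1 + dd.1) (q.2 + dd.2)
                && pvFunctioning grid R C (q.1 + dd.1) (q.2 + dd.2)) = true from hhit)]
        rw [hstep, ih]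
        simp [hbomb, hhit]
        omega
      · have hstep : pvCountCellStep grid R C q.1 st q.2 = (st.1, st.2 + 1) := by
          simp only [pvCountCellStep]
          rw [if_pos (show (pvCell grid q.1 q.2 == 1) = true from hbomb),
            if_neg (show ¬ (pvDirections.any fun dd =>
              pvInb R C (q.1 + dd.1) (q.2 + dd.2)
                && pvFunctioning grid R C (q.1 + dd.1) (q.2 + dd.2)) = true from hhit)]
        rw [hstep, ih]
        have hhitf : pvHit grid R C q = false := by simpa using hhit
        simp [hbomb, hhitf]
        omega
    · have hstep : pvCountCellStep grid R C q.1 st q.2 = st := by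
        simp only [pvCountCellStep]
        rw [if_neg (show ¬ (pvCell grid q.1 q.2 == 1) = true from hbomb)]
      have hbombf : pvBombB grid q = false := by simpa using hbomb
      rw [hstep, ih]
      simp [hbombf]

lemma detect_bombs_alt_eq (grid : List (List Int)) (R C : Int) :
    detect_bombs_alt grid R C
      = ((((pvCells R C).filter (fun q => pvBombB grid q && pvHit grid R C q)).length : Int),
         (((pvCells R C).filter (fun q => pvBombB grid q && !pvHit grid R C q)).length : Int)) := by
  have h := foldl_nested R C (fun st r c => pvCountCellStep grid R C r st c) (((0 : Int), (0 : Int)))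
  simp only [detect_bombs_alt, h]
  rw [countFold grid R C (pvCells R C) (0, 0)]
  simp

lemma ports_agree (grid : List (List Int)) (R C : Int) :
    detect_bombs grid R C = detect_bombs_alt grid R C := by
  rw [detect_bombs_eq, detect_bombs_alt_eq]
  have hsplit : ((pvCells R C).filter (fun q => pvBombB grid q && pvHit grid R C q))
      = (pvB0 grid R C).filter (fun b => pvHit grid R C b) := by
    rw [pvB0, List.filter_filter]
    exact List.filter_congr (fun x _ => Bool.and_comm _ _)
  have hsplit2 : ((pvCells R C).filter (fun q => pvBombB grid q && !pvHit grid R C q))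
      = (pvB0 grid R C).filter (fun b => !pvHit grid R C b) := by
    rw [pvB0, List.filter_filter]
    exact List.filter_congr (fun x _ => Bool.and_comm _ _)
  have hcongr : (pvB0 grid R C).filter (fun b => !pvHitA grid R C b)
      = (pvB0 grid R C).filter (fun b => !pvHit grid R C b) := by
    apply List.filter_congr
    intro b hb
    have hbmem : b ∈ pvCells R C := List.mem_of_mem_filter hb
    have hbomb : pvBombB grid b = true := List.of_mem_filter hb
    rw [hitA_eq_hit grid R C b hbmem hbomb]
  have hlen : (pvB0 grid R C).length
      = ((pvB0 grid R C).filter (fun b => pvHit grid R C b)).length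
        + ((pvB0 grid R C).filter (fun b => !pvHit grid R C b)).length :=
    List.length_eq_length_filter_add _
  rw [hcongr, hsplit, hsplit2]
  rw [Prod.ext_iff]
  constructor
  · simp only []
    omega
  · rfl


-- ===== VERDICT (by name: the statement is the Claim_ definition above) =====
theorem detect_bombs_spec : Claim_equal_detect_bombs := by
  intro grid R C _ _
  unfold Spec_detect_bombs
  exact ports_agree grid R C
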